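-- pv_equiv track=rewrite | github.com/posl/comment_recommendation | script/mod_gen/2_time/zh/144_D/1.py | solve
-- ===== SOURCE A (Python) =====
-- def solve(n):
--     a = 1
--     b = n
--     while a < b:
--         mid = int((a + b) / 2)
--         if mid * mid < n:
--             a = mid + 1
--         else:
--             b = mid
--     return a + n - a * a
-- ===== SOURCE B (Python) =====
-- import math
--
-- def solve(n):
--     # closed form: a = ceil(sqrt(n)) for n >= 1, via the integer square root
--     if n < 1:
--         return n
--     s = math.isqrt(n)
--     a = s if s * s == n else s + 1
--     return a + n - a * a
-- ===== Notes on version B (the rewrite author's own statement) =====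
-- stated objective: idiomatic
-- what changed: Replaces the binary-search loop for the least a with a*a >= n by a closed form using math.isqrt (a = isqrt(n), rounded up unless n is a perfect square).
import Mathlib
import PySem

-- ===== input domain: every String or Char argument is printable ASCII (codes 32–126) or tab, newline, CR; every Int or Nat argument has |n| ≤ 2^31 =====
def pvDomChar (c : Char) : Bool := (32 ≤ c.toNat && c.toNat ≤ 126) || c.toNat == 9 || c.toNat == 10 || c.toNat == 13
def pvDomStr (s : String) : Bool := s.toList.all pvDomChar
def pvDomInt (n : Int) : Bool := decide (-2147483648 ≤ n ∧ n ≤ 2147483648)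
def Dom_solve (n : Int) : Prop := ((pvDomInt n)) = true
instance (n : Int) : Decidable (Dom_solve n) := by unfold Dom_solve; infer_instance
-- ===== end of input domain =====

-- B replaces A's binary-search loop by a closed form via the integer square root (objective: idiomatic, closed form vs iteration).

-- ===== PORT A =====
-- the while loop; Python's `mid = int((a + b) / 2)` truncates toward zero, but every state the
-- loop reaches from solve's entry has 1 ≤ a < b, so a + b > 0 and truncation = floor; floor is
-- used here (it also gives termination on all arguments).
def solveLoop (n a b : Int) : Int :=
  if _h : a < b then
    let mid := PySem.Int.floordiv (a + b) 2
    if mid * mid < n then solveLoop n (mid + 1) b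
    else solveLoop n a mid
  else a + n - a * a
termination_by (b - a).toNat
decreasing_by
  · have _hge := (PySem.Int.floordiv_two_mid_bounds (le_of_lt _h)).1
    have hlt : PySem.Int.floordiv (a + b) 2 < b := by
      rw [PySem.Int.floordiv_lt_iff_lt_mul (by omega)]; omega
    omega
  · have _hge := (PySem.Int.floordiv_two_mid_bounds (le_of_lt _h)).1
    have hlt : PySem.Int.floordiv (a + b) 2 < b := by
      rw [PySem.Int.floordiv_lt_iff_lt_mul (by omega)]; omega
    omega

def solve (n : Int) : Int := solveLoop n 1 n

-- ===== PORT B =====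
def solve_alt (n : Int) : Int :=
  if n < 1 then n
  else
    let s : Int := Int.sqrt n          -- math.isqrt(n)
    let a : Int := if s * s = n then s else s + 1
    a + n - a * a

-- ===== PRECONDITION & SPEC =====
def Spec_solve (n : Int) (out : Int) : Prop := out = solve_alt n
instance (n : Int) (out : Int) : Decidable (Spec_solve n out) := by unfold Spec_solve; infer_instance

-- ===== CLAIM (what is proved, stated in full; the proofs are below) =====
def Claim_equal_solve : Prop := ∀ (n : Int), Dom_solve n → Spec_solve n (solve n)

-- ===== LEMMAS AND PROOFS =====

-- The loop converges to c, the unique value in [a,b] with c*c ≥ n and t*t < n for a ≤ t < c.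
theorem solveLoop_eq (n a b c : Int) (ha : 1 ≤ a) (hac : a ≤ c) (hcb : c ≤ b)
    (hc : n ≤ c * c) (hlt : ∀ t, a ≤ t → t < c → t * t < n) :
    solveLoop n a b = c + n - c * c := by
  induction a, b using solveLoop.induct n with
  | case1 a b h mid hmidlt ih =>
    rw [solveLoop]
    simp only [h, dif_pos]
    have hb := PySem.Int.floordiv_two_mid_bounds (le_of_lt h)
    have hmid_lt_b : mid < b := by
      show PySem.Int.floordiv (a + b) 2 < b
      rw [PySem.Int.floordiv_lt_iff_lt_mul (by omega)]; omega
    have hmid_ge : a ≤ mid := hb.1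
    show (if mid * mid < n then solveLoop n (mid + 1) b else solveLoop n a mid) = c + n - c * c
    rw [if_pos hmidlt]
    -- mid² < n, so c > mid
    have hcmid : mid + 1 ≤ c := by
      by_contra hle
      push Not at hle
      have : c * c ≤ mid * mid :=
        mul_le_mul (by omega) (by omega) (by omega) (by omega)
      omega
    exact ih (by omega) hcmid hcb (fun t h1 h2 => hlt t (by omega) h2)
  | case2 a b h mid hmidge ih =>
    rw [solveLoop]
    simp only [h, dif_pos]
    have hb := PySem.Int.floordiv_two_mid_bounds (le_of_lt h)
    have hmid_lt_b : mid < b := by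
      show PySem.Int.floordiv (a + b) 2 < b
      rw [PySem.Int.floordiv_lt_iff_lt_mul (by omega)]; omega
    have hmid_ge : a ≤ mid := hb.1
    show (if mid * mid < n then solveLoop n (mid + 1) b else solveLoop n a mid) = c + n - c * c
    rw [if_neg hmidge]
    -- mid² ≥ n, so c ≤ mid (else hlt applied to mid gives mid² < n)
    have hcmid : c ≤ mid := by
      by_contra hgt
      push Not at hgt
      have := hlt mid hmid_ge hgt
      omega
    exact ih ha hac hcmid hlt
  | case3 a b h =>
    rw [solveLoop]
    simp only [h, dif_neg, not_false_iff]
    have : a = c := by omega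
    subst this; rfl

-- Int.sqrt bounds for nonneg n
theorem sqrt_bounds (n : Int) (hn : 0 ≤ n) :
    Int.sqrt n * Int.sqrt n ≤ n ∧ n < (Int.sqrt n + 1) * (Int.sqrt n + 1) := by
  obtain ⟨m, rfl⟩ := Int.eq_ofNat_of_zero_le hn
  rw [Int.sqrt_natCast]
  have h1 := Nat.sqrt_le' m
  have h2 := Nat.lt_succ_sqrt' m
  rw [pow_two] at h1 h2
  constructor
  · exact_mod_cast h1
  · exact_mod_cast h2

-- ===== VERDICT (by name: the statement is the Claim_ definition above) =====
theorem solve_spec : Claim_equal_solve := by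
  intro n _
  show solve n = solve_alt n
  unfold solve solve_alt
  by_cases hn : n < 1
  · rw [if_pos hn, solveLoop]
    simp only [dif_neg (by omega : ¬ (1:Int) < n)]
    ring
  · rw [if_neg hn]
    push Not at hn
    obtain ⟨h1, h2⟩ := sqrt_bounds n (by omega)
    have hs0 : 0 ≤ Int.sqrt n := Int.sqrt_nonneg n
    have hs1 : 1 ≤ Int.sqrt n := by nlinarith
    by_cases hsq : Int.sqrt n * Int.sqrt n = n
    · have heq := solveLoop_eq n 1 n (Int.sqrt n) le_rfl hs1 (by nlinarith) (by omega)
        (fun t h1t h2t => by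
          calc t * t ≤ (Int.sqrt n - 1) * (Int.sqrt n - 1) :=
                mul_le_mul (by omega) (by omega) (by omega) (by omega)
            _ < n := by nlinarith)
      rw [heq, hsq]
      simp [hsq]
    · have hlt2 : Int.sqrt n * Int.sqrt n < n := lt_of_le_of_ne h1 hsq
      have heq := solveLoop_eq n 1 n (Int.sqrt n + 1) le_rfl (by omega) (by nlinarith) (by omega)
        (fun t h1t h2t => by
          calc t * t ≤ Int.sqrt n * Int.sqrt n :=
                mul_le_mul (by omega) (by omega) (by omega) (by omega)
            _ < n := hlt2)
      rw [heq]
      simp [hsq]
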